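-- pv_equiv track=rewrite | github.com/SanthoshKannanSP/leetcode-100-days-challenge | maximum-spending-after-buying-items.py | maxSpending
-- ===== SOURCE A (Python) =====
-- from typing import List
--
-- def maxSpending(values: List[List[int]]) -> int:
--     nums=[]
--     for row in values:
--         for val in row:
--             nums.append(val)
--
--     ans=0
--     c=1
--     nums.sort()
--
--     for n in nums:
--         ans += c*n
--         c += 1
--
--     return ans
-- ===== SOURCE B (Python) =====
-- def _merge(a, b):
--     out = []
--     i = j = 0
--     while i < len(a) and j < len(b):
--         if a[i] <= b[j]:
--             out.append(a[i]); i += 1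
--         else:
--             out.append(b[j]); j += 1
--     out.extend(a[i:])
--     out.extend(b[j:])
--     return out
--
-- def maxSpending(values):
--     merged = []
--     for row in values:
--         merged = _merge(merged, sorted(row))
--     ans = 0
--     for i, v in enumerate(merged):
--         ans += (i + 1) * v
--     return ans
-- ===== Notes on version B (the rewrite author's own statement) =====
-- stated objective: alternative
-- what changed: Instead of flattening everything into one list and sorting it globally, B sorts each row and folds the rows together with a two-pointer merge (merge-sort style), then computes the weighted sum by enumeration instead of a running counter.
import Mathlib
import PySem

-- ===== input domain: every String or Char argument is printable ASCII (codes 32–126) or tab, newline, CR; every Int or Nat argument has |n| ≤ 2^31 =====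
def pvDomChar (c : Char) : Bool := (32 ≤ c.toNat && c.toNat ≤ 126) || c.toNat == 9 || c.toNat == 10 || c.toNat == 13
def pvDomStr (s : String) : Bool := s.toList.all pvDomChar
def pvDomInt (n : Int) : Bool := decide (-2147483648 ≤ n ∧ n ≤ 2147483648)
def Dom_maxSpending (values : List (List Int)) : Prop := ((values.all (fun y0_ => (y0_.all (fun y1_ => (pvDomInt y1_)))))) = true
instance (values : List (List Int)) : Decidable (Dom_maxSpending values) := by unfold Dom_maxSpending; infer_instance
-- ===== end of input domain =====

-- B: instead of flattening everything and sorting globally, B sorts each row and folds the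
-- rows together with a two-pointer merge, then takes the weighted sum by enumeration
-- (objective: alternative algorithm, same exact result).

-- ===== PORT A =====
def maxSpending (values : List (List Int)) : Int :=
  -- nums = []; for row in values: for val in row: nums.append(val)
  let nums := values.foldl (fun acc row => row.foldl (fun a v => a ++ [v]) acc) []
  -- nums.sort()
  let nums := PySem.List.sorted nums (fun x => x) false
  -- ans = 0; c = 1; for n in nums: ans += c*n; c += 1
  (nums.foldl (fun (p : Int × Int) n => (p.1 + p.2 * n, p.2 + 1)) (0, 1)).1

-- ===== PORT B =====
-- _merge(a, b): two-pointer merge of two sorted lists (pointers become structural recursion)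
def pvMerge : List Int → List Int → List Int
  | [], b => b
  | a, [] => a
  | x :: xs, y :: ys =>
      if x ≤ y then x :: pvMerge xs (y :: ys) else y :: pvMerge (x :: xs) ys

def maxSpending_alt (values : List (List Int)) : Int :=
  -- merged = []; for row in values: merged = _merge(merged, sorted(row))
  let merged := values.foldl (fun acc row => pvMerge acc (PySem.List.sorted row (fun x => x) false)) []
  -- ans = 0; for i, v in enumerate(merged): ans += (i+1)*v
  (PySem.List.enumerate merged).foldl (fun a p => a + (p.1 + 1) * p.2) 0

-- ===== PRECONDITION & SPEC =====
def Spec_maxSpending (values : List (List Int)) (out : Int) : Prop := out = maxSpending_alt values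
instance (values : List (List Int)) (out : Int) : Decidable (Spec_maxSpending values out) := by unfold Spec_maxSpending; infer_instance

-- ===== CLAIM (what is proved, stated in full; the proofs are below) =====
def Claim_equal_maxSpending : Prop := ∀ (values : List (List Int)), Dom_maxSpending values → Spec_maxSpending values (maxSpending values)

-- ===== LEMMAS AND PROOFS =====

theorem pvMerge_perm (a b : List Int) : (pvMerge a b).Perm (a ++ b) := by
  induction a generalizing b with
  | nil => simp [pvMerge]
  | cons x xs ih =>
    induction b with
    | nil => simp [pvMerge]
    | cons y ys ihb =>
      simp only [pvMerge]
      split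
      · exact (ih (y :: ys)).cons x
      · exact (ihb.cons y).trans
          (List.perm_middle (a := y) (l₁ := x :: xs) (l₂ := ys)).symm

theorem pvMerge_pairwise (a b : List Int) (ha : a.Pairwise (· ≤ ·)) (hb : b.Pairwise (· ≤ ·)) :
    (pvMerge a b).Pairwise (· ≤ ·) := by
  induction a generalizing b with
  | nil => simpa [pvMerge]
  | cons x xs ih =>
    induction b with
    | nil => simp only [pvMerge]; exact ha
    | cons y ys ihb =>
      rw [List.pairwise_cons] at ha hb
      simp only [pvMerge]
      split
      · rename_i hxy
        rw [List.pairwise_cons]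
        refine ⟨?_, ih (y :: ys) ha.2 (List.pairwise_cons.mpr hb)⟩
        intro z hz
        have := (pvMerge_perm xs (y :: ys)).mem_iff.mp hz
        rcases List.mem_append.mp this with h | h
        · exact ha.1 z h
        · rcases List.mem_cons.mp h with h | h
          · exact h ▸ hxy
          · exact le_trans hxy (hb.1 z h)
      · rename_i hxy
        rw [not_le] at hxy
        rw [List.pairwise_cons]
        refine ⟨?_, ihb hb.2⟩
        intro z hz
        have := (pvMerge_perm (x :: xs) ys).mem_iff.mp hz
        rcases List.mem_append.mp this with h | h
        · rcases List.mem_cons.mp h with h | h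
          · exact h ▸ le_of_lt hxy
          · exact le_trans (le_of_lt hxy) (ha.1 z h)
        · exact hb.1 z h

-- the inner append loop of A
theorem foldl_snoc (row : List Int) (acc : List Int) :
    row.foldl (fun a v => a ++ [v]) acc = acc ++ row := by
  induction row generalizing acc with
  | nil => simp
  | cons v vs ih => simp [List.foldl_cons, ih]

-- A's nums is the flatten of values
theorem nums_eq_flatten (values : List (List Int)) (acc : List Int) :
    values.foldl (fun acc row => row.foldl (fun a v => a ++ [v]) acc) acc = acc ++ values.flatten := by
  induction values generalizing acc with
  | nil => simp
  | cons r rs ih =>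
    rw [List.foldl_cons, foldl_snoc, ih]
    simp

-- B's merged list is a sorted permutation of the flatten
theorem merged_invariant (values : List (List Int)) (acc : List Int)
    (hs : acc.Pairwise (· ≤ ·)) :
    (values.foldl (fun acc row => pvMerge acc (PySem.List.sorted row (fun x => x) false)) acc).Pairwise (· ≤ ·) ∧
    (values.foldl (fun acc row => pvMerge acc (PySem.List.sorted row (fun x => x) false)) acc).Perm (acc ++ values.flatten) := by
  induction values generalizing acc with
  | nil => simpa
  | cons r rs ih =>
    have hrow : (PySem.List.sorted r (fun x => x) false).Pairwise (· ≤ ·) := by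
      simpa using PySem.List.sorted_pairwise (xs := r) (key := fun x => x)
    have hm := pvMerge_pairwise acc _ hs hrow
    obtain ⟨h1, h2⟩ := ih (pvMerge acc (PySem.List.sorted r (fun x => x) false)) hm
    refine ⟨h1, ?_⟩
    simp only [List.foldl_cons] at *
    refine h2.trans ?_
    have hp : (pvMerge acc (PySem.List.sorted r (fun x => x) false)).Perm (acc ++ r) :=
      (pvMerge_perm _ _).trans (List.Perm.append_left acc (PySem.List.sorted_perm r (fun x => x) false))
    calc (pvMerge acc (PySem.List.sorted r (fun x => x) false) ++ rs.flatten).Perm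
          ((acc ++ r) ++ rs.flatten) := hp.append_right _
      _ = acc ++ (r :: rs).flatten := by simp

-- the weighted-sum loops agree: counter fold = enumerate fold
theorem sum_loops_eq (l : List Int) (s c : Int) :
    (l.foldl (fun (p : Int × Int) n => (p.1 + p.2 * n, p.2 + 1)) (s, c)).1 =
    (PySem.List.enumerate l (c - 1)).foldl (fun a p => a + (p.1 + 1) * p.2) s := by
  induction l generalizing s c with
  | nil => simp [PySem.List.enumerate_nil]
  | cons x xs ih =>
    simp only [List.foldl_cons, PySem.List.enumerate_cons]
    rw [ih (s + c * x) (c + 1)]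
    ring_nf

-- ===== VERDICT (by name: the statement is the Claim_ definition above) =====
theorem maxSpending_spec : Claim_equal_maxSpending := by
  intro values _
  obtain ⟨hpw, hperm⟩ := merged_invariant values [] List.Pairwise.nil
  have hsorted : PySem.List.sorted
      (values.foldl (fun acc row => row.foldl (fun a v => a ++ [v]) acc) []) (fun x => x) false =
      values.foldl (fun acc row => pvMerge acc (PySem.List.sorted row (fun x => x) false)) [] := by
    rw [nums_eq_flatten]
    exact PySem.List.sorted_id_eq_of_perm_of_pairwise _ _ hperm hpw
  show ((PySem.List.sorted
      (values.foldl (fun acc row => row.foldl (fun a v => a ++ [v]) acc) []) (fun x => x) false).foldl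
        (fun (p : Int × Int) n => (p.1 + p.2 * n, p.2 + 1)) (0, 1)).1 =
    (PySem.List.enumerate
      (values.foldl (fun acc row => pvMerge acc (PySem.List.sorted row (fun x => x) false)) [])).foldl
        (fun a p => a + (p.1 + 1) * p.2) 0
  rw [hsorted, sum_loops_eq]
  norm_num
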